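-- pv_equiv track=rewrite | github.com/arvindra1/my-app | src/componets/Y.PY | get_min_max_diff
-- ===== SOURCE A (Python) =====
-- def get_min_max_diff(s1, s2):
--     # replace question marks with a and z to get the minimum and maximum difference
--     s1_min = s1.replace('?', 'a')
--     s2_min = s2.replace('?', 'a')
--     s1_max = s1.replace('?', 'z')
--     s2_max = s2.replace('?', 'z')
--
--     # calculate the minimum and maximum difference between the two strings
--     diff_min = abs(sum(ord(c1) - ord(c2) for c1, c2 in zip(s1_min, s2_min)))
--     diff_max = abs(sum(ord(c1) - ord(c2) for c1, c2 in zip(s1_max, s2_max)))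
--
--     return diff_min, diff_max
-- ===== SOURCE B (Python) =====
-- def get_min_max_diff(s1, s2):
--     # one pass over the zipped region: accumulate the 'a'-replacement total and
--     # count '?'s on each side; the 'z'-replacement total is total + 25*(q1 - q2)
--     total = 0
--     q1 = 0
--     q2 = 0
--     for c1, c2 in zip(s1, s2):
--         if c1 == '?':
--             q1 += 1
--             c1 = 'a'
--         if c2 == '?':
--             q2 += 1
--             c2 = 'a'
--         total += ord(c1) - ord(c2)
--     return abs(total), abs(total + 25 * (q1 - q2))
-- ===== Notes on version B (the rewrite author's own statement) =====
-- stated objective: faster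
-- what changed: Single pass over zip(s1,s2) accumulating the 'a'-replacement difference and the per-side '?' counts, deriving the 'z'-replacement value by the closed-form offset total + 25*(q1-q2) instead of building four replaced strings and summing twice.
import Mathlib
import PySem

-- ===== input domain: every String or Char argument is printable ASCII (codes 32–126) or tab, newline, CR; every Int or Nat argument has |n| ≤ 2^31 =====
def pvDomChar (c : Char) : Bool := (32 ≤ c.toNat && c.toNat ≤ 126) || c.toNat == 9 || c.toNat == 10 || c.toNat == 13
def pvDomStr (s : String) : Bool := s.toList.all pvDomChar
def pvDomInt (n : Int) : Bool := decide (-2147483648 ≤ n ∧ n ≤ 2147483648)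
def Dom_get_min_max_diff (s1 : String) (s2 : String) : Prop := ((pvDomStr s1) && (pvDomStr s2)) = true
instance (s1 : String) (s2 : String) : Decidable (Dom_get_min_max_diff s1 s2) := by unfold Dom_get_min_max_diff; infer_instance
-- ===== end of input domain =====

-- B replaces A's four intermediate replaced strings and two summations by one pass over the
-- zipped pairs, deriving the 'z'-replacement value from the 'a'-replacement total via the
-- closed-form offset 25*(q1-q2) (objective: faster by a constant factor).

-- ===== PORT A =====
def get_min_max_diff (s1 : String) (s2 : String) : Int × Int :=
  let s1_min := PySem.Str.replace s1 "?" "a"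
  let s2_min := PySem.Str.replace s2 "?" "a"
  let s1_max := PySem.Str.replace s1 "?" "z"
  let s2_max := PySem.Str.replace s2 "?" "z"
  let diff_min : Int :=
    |((s1_min.toList.zip s2_min.toList).map (fun p => (p.1.toNat : Int) - (p.2.toNat : Int))).sum|
  let diff_max : Int :=
    |((s1_max.toList.zip s2_max.toList).map (fun p => (p.1.toNat : Int) - (p.2.toNat : Int))).sum|
  (diff_min, diff_max)

-- ===== PORT B =====
def get_min_max_diff_alt (s1 : String) (s2 : String) : Int × Int :=
  let st := (s1.toList.zip s2.toList).foldl
    (fun (acc : Int × Int × Int) cc =>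
      let q1 := if cc.1 = '?' then acc.2.1 + 1 else acc.2.1
      let c1 := if cc.1 = '?' then 'a' else cc.1
      let q2 := if cc.2 = '?' then acc.2.2 + 1 else acc.2.2
      let c2 := if cc.2 = '?' then 'a' else cc.2
      (acc.1 + ((c1.toNat : Int) - (c2.toNat : Int)), q1, q2))
    (0, 0, 0)
  (|st.1|, |st.1 + 25 * (st.2.1 - st.2.2)|)

-- ===== PRECONDITION & SPEC =====
def Spec_get_min_max_diff (s1 : String) (s2 : String) (out : Int × Int) : Prop := out = get_min_max_diff_alt s1 s2
instance (s1 : String) (s2 : String) (out : Int × Int) : Decidable (Spec_get_min_max_diff s1 s2 out) := by unfold Spec_get_min_max_diff; infer_instance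

-- ===== CLAIM (what is proved, stated in full; the proofs are below) =====
def Claim_equal_get_min_max_diff : Prop := ∀ (s1 : String) (s2 : String), Dom_get_min_max_diff s1 s2 → Spec_get_min_max_diff s1 s2 (get_min_max_diff s1 s2)

-- ===== LEMMAS AND PROOFS =====

-- the character substitution performed by s.replace('?', r) for a one-character pattern
def pvSub (r : Char) (x : Char) : Char := if x = '?' then r else x

lemma pv_replace_go_single (r : Char) : ∀ (fuel : Nat) (l acc : List Char),
    l.length ≤ fuel →
    PySem.Chars.replace.go ['?'] [r] fuel l acc = acc.reverse ++ l.map (pvSub r) := by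
  intro fuel
  induction fuel with
  | zero =>
    intro l acc h
    cases l with
    | nil => simp [PySem.Chars.replace.go]
    | cons c t => simp at h
  | succ n ih =>
    intro l acc h
    cases l with
    | nil => simp [PySem.Chars.replace.go]
    | cons c t =>
      by_cases hc : c = '?'
      · subst hc
        rw [PySem.Chars.replace.go]
        simp only [List.isPrefixOf, BEq.rfl, Bool.true_and, if_pos]
        rw [ih]
        · simp [pvSub]
        · simpa using Nat.le_of_succ_le_succ h
      · rw [PySem.Chars.replace.go]
        have : List.isPrefixOf ['?'] (c :: t) = false := by
          simp [List.isPrefixOf]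
          exact fun hh => hc (by simpa using hh.symm)
        rw [this]
        simp only [Bool.false_eq_true, if_false]
        rw [ih t (c :: acc) (by simpa using Nat.le_of_succ_le_succ h)]
        simp [pvSub, hc]

lemma pv_replace_single (r : Char) (l : List Char) :
    PySem.Chars.replace l ['?'] [r] = l.map (pvSub r) := by
  rw [PySem.Chars.replace]
  simp only [List.isEmpty_cons, Bool.false_eq_true, if_false]
  simpa using pv_replace_go_single r l.length l [] le_rfl

-- the per-pair summand after substitution
def pvTerm (r : Char) (p : Char × Char) : Int :=
  ((pvSub r p.1).toNat : Int) - ((pvSub r p.2).toNat : Int)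

lemma pv_sum_z_eq (l : List (Char × Char)) :
    (l.map (pvTerm 'z')).sum =
      (l.map (pvTerm 'a')).sum
        + 25 * ((l.countP (fun p => p.1 = '?') : Int) - (l.countP (fun p => p.2 = '?') : Int)) := by
  induction l with
  | nil => simp
  | cons p t ih =>
    simp only [List.map_cons, List.sum_cons, List.countP_cons, ih]
    by_cases h1 : p.1 = '?' <;> by_cases h2 : p.2 = '?' <;>
      simp [pvTerm, pvSub, h1, h2] <;> omega

lemma pv_fold_inv (l : List (Char × Char)) : ∀ (t q1 q2 : Int),
    l.foldl
      (fun (acc : Int × Int × Int) cc =>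
        let q1 := if cc.1 = '?' then acc.2.1 + 1 else acc.2.1
        let c1 := if cc.1 = '?' then 'a' else cc.1
        let q2 := if cc.2 = '?' then acc.2.2 + 1 else acc.2.2
        let c2 := if cc.2 = '?' then 'a' else cc.2
        (acc.1 + ((c1.toNat : Int) - (c2.toNat : Int)), q1, q2))
      (t, q1, q2)
    = (t + (l.map (pvTerm 'a')).sum,
       q1 + (l.countP (fun p => p.1 = '?') : Int),
       q2 + (l.countP (fun p => p.2 = '?') : Int)) := by
  induction l with
  | nil => intro t q1 q2; simp
  | cons p tl ih =>
    intro t q1 q2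
    simp only [List.foldl_cons, List.map_cons, List.sum_cons, List.countP_cons, ih]
    by_cases h1 : p.1 = '?' <;> by_cases h2 : p.2 = '?' <;>
      simp [pvTerm, pvSub, h1, h2, Prod.ext_iff] <;> omega

-- ===== VERDICT (by name: the statement is the Claim_ definition above) =====
theorem get_min_max_diff_spec : Claim_equal_get_min_max_diff := by
  intro s1 s2 _
  unfold Spec_get_min_max_diff get_min_max_diff get_min_max_diff_alt
  simp only [PySem.Str.toList_replace]
  have hrep : ∀ (r : Char) (s : String),
      PySem.Chars.replace s.toList "?".toList [r] = s.toList.map (pvSub r) := by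
    intro r s; simpa using pv_replace_single r s.toList
  have h1a := hrep 'a' s1
  have h2a := hrep 'a' s2
  have h1z := hrep 'z' s1
  have h2z := hrep 'z' s2
  simp only [show ("a" : String).toList = ['a'] from rfl,
             show ("z" : String).toList = ['z'] from rfl] at *
  rw [h1a, h2a, h1z, h2z, List.zip_map, List.zip_map, List.map_map, List.map_map]
  rw [pv_fold_inv]
  have hterm : ∀ r : Char,
      ((fun p : Char × Char => (p.1.toNat : Int) - (p.2.toNat : Int)) ∘ Prod.map (pvSub r) (pvSub r))
        = pvTerm r := by
    intro r; funext p; simp [pvTerm, Prod.map]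
  rw [hterm, hterm, pv_sum_z_eq]
  simp
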